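-- pv_equiv track=rewrite | github.com/Aaandria/GOA-Homework | day 44/homework/homework02.py | maximum_seating
-- ===== SOURCE A (Python) =====
-- def maximum_seating(lst):
--     count = 0
--     n = len(lst)
--     i = 0
--     while i < n:
--         if lst[i] == 0:
--             if i < 2:
--                 if sum (lst [:i+3]) == 0:
--                     lst [i] = 1
--                     count += 1
--                     i += 1
--                 else:
--                     i += 1
--             elif i > n-2:
--                 if sum (lst [i-2:]) == 0:
--                     lst [i] = 1
--                     count += 1
--                 else:
--                     return count
--             else:
--                 if sum (lst [i-2:i+3]) == 0:
--                     lst [i] = 1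
--                     count += 1
--                     i += 1
--                 else:
--                     i += 1
--         else:
--             i += 1
--     return count
-- ===== SOURCE B (Python) =====
-- def maximum_seating(lst):
--     # Sliding-window greedy: maintain the running sum s of the occupancy window
--     # lst[max(0,i-2):i+3] incrementally instead of re-summing a slice each step.
--     # Mutates lst exactly like the original (seats taken are written as 1).
--     n = len(lst)
--     count = 0
--     s = sum(lst[:min(n, 3)])  # window for i = 0
--     for i in range(n):
--         if lst[i] == 0 and s == 0:
--             lst[i] = 1
--             count += 1
--             s += 1
--         # slide the window to be centred at i+1
--         if i + 3 < n:
--             s += lst[i + 3]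
--         if i - 2 >= 0:
--             s -= lst[i - 2]
--     return count
-- ===== Notes on version B (the rewrite author's own statement) =====
-- stated objective: alternative
-- what changed: A re-sums a fresh 5-element slice of the list at every index; B maintains one running occupancy-window sum, updated in O(1) by adding the entering neighbour and subtracting the leaving one, and checks it in a single for-loop.
import Mathlib
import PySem

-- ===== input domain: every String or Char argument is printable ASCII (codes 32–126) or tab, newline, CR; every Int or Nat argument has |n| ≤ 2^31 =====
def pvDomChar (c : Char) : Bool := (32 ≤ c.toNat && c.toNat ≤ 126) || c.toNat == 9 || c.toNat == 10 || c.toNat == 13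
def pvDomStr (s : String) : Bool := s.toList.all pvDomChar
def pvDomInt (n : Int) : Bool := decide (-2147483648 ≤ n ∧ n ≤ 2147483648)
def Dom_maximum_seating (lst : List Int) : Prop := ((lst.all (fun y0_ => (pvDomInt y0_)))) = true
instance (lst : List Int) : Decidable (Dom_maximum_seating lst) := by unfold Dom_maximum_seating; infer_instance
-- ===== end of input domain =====

-- B replaces A's per-step slice re-summing with an incrementally maintained sliding
-- window sum (objective: alternative, same asymptotic cost). Both A and B mutate the
-- Python list identically (seats taken are written as 1); the equivalence proved here
-- is about the return value.

-- ===== PORT A =====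
-- literal port of A's while loop; the i>n-2 success branch loops again with the
-- same i, exactly as the Python does
def msAloop (lst : List Int) (i : Nat) (count : Int) : Int :=
  if h : i < lst.length then
    if PySem.List.pyGetD lst (i : Int) 0 = 0 then
      if (i : Int) < 2 then
        if (PySem.List.slice lst none (some ((i : Int) + 3))).sum = 0 then
          msAloop (PySem.List.pySetD lst (i : Int) 1) (i + 1) (count + 1)
        else
          msAloop lst (i + 1) count
      else if (i : Int) > (lst.length : Int) - 2 then
        if (PySem.List.slice lst (some ((i : Int) - 2)) none).sum = 0 then
          msAloop (PySem.List.pySetD lst (i : Int) 1) i (count + 1)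
        else
          count
      else
        if (PySem.List.slice lst (some ((i : Int) - 2)) (some ((i : Int) + 3))).sum = 0 then
          msAloop (PySem.List.pySetD lst (i : Int) 1) (i + 1) (count + 1)
        else
          msAloop lst (i + 1) count
    else
      msAloop lst (i + 1) count
  else
    count
termination_by 2 * (lst.length - i) + (if lst.getD i 0 = 0 then 1 else 0)
decreasing_by
  all_goals simp_all [PySem.List.pySetD_natCast, PySem.List.pyGetD_natCast, List.getD_eq_getElem?_getD]
  all_goals split_ifs <;> omega

def maximum_seating (lst : List Int) : Int := msAloop lst 0 0

-- ===== PORT B =====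
-- literal port of Source B's loop body: seat if possible, then slide the window sum
def msBstep (n : Nat) (st : List Int × Int × Int) (i : Nat) : List Int × Int × Int :=
  let l := st.1
  let cnt := st.2.1
  let s := st.2.2
  let st1 :=
    if PySem.List.pyGetD l (i : Int) 0 = 0 ∧ s = 0 then
      (PySem.List.pySetD l (i : Int) 1, cnt + 1, s + 1)
    else
      (l, cnt, s)
  let st2 :=
    if i + 3 < n then (st1.1, st1.2.1, st1.2.2 + PySem.List.pyGetD st1.1 ((i : Int) + 3) 0)
    else st1
  if 2 ≤ i then (st2.1, st2.2.1, st2.2.2 - PySem.List.pyGetD st2.1 ((i : Int) - 2) 0)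
  else st2

def maximum_seating_alt (lst : List Int) : Int :=
  let n := lst.length
  let s0 := (PySem.List.slice lst none (some ((min n 3 : Nat) : Int))).sum
  ((List.range n).foldl (msBstep n) (lst, 0, s0)).2.1

-- ===== PRECONDITION & SPEC =====
def Spec_maximum_seating (lst : List Int) (out : Int) : Prop := out = maximum_seating_alt lst
instance (lst : List Int) (out : Int) : Decidable (Spec_maximum_seating lst out) := by unfold Spec_maximum_seating; infer_instance

-- ===== CLAIM (what is proved, stated in full; the proofs are below) =====
def Claim_equal_maximum_seating : Prop := ∀ (lst : List Int), Dom_maximum_seating lst → Spec_maximum_seating lst (maximum_seating lst)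

-- ===== LEMMAS AND PROOFS =====

-- the occupancy-window sum lst[max(0,i-2):i+3] that both programs test against 0
def W (l : List Int) (i : Nat) : Int := (l.take (i + 3)).sum - (l.take (i - 2)).sum

lemma sum_take_succ (l : List Int) (m : Nat) :
    (l.take (m + 1)).sum = (l.take m).sum + (if m < l.length then l.getD m 0 else 0) := by
  rw [List.take_add_one, List.sum_append]
  rcases Nat.lt_or_ge m l.length with h | h
  · simp [List.getD_eq_getElem?_getD, h]
  · simp [Nat.not_lt.mpr h]

lemma sum_set_eq (l : List Int) (i : Nat) (v : Int) (h : i < l.length) :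
    (l.set i v).sum = l.sum + v - l.getD i 0 := by
  have hd : l.sum = (l.take i).sum + (l[i] + (l.drop (i + 1)).sum) := by
    conv_lhs => rw [← List.take_append_drop i l, List.drop_eq_getElem_cons h]
    rw [List.sum_append, List.sum_cons]
  rw [List.sum_set]
  simp only [h, if_pos, List.getD_eq_getElem?_getD, List.getElem?_eq_getElem h, Option.getD_some]
  omega

lemma sum_take_set (l : List Int) (i m : Nat) (v : Int) (h : i < m) (hl : i < l.length) :
    ((l.set i v).take m).sum = (l.take m).sum + v - l.getD i 0 := by
  rw [List.take_set, sum_set_eq (l.take m) i v (by simp; omega)]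
  congr 1
  simp [List.getD_eq_getElem?_getD, h]

lemma sum_take_set_ge (l : List Int) (i m : Nat) (v : Int) (h : m ≤ i) :
    ((l.set i v).take m).sum = (l.take m).sum := by
  rw [List.take_set, List.set_eq_of_length_le (by simp; omega)]

lemma sum_drop_take (l : List Int) (a m : Nat) :
    ((l.drop a).take m).sum = (l.take (a + m)).sum - (l.take a).sum := by
  rw [List.take_add, List.sum_append]; ring

lemma W_set (l : List Int) (i : Nat) (h : i < l.length) :
    W (l.set i 1) i = W l i + 1 - l.getD i 0 := by
  unfold W
  rw [sum_take_set l i (i + 3) 1 (by omega) h, sum_take_set_ge l i (i - 2) 1 (by omega)]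
  ring

lemma W_slide (l : List Int) (i : Nat) (h : i < l.length) :
    W l (i + 1) = W l i + (if i + 3 < l.length then l.getD (i + 3) 0 else 0)
      - (if 2 ≤ i then l.getD (i - 2) 0 else 0) := by
  unfold W
  have h4 : i + 1 + 3 = (i + 3) + 1 := by omega
  rw [h4, sum_take_succ l (i + 3)]
  rcases Nat.lt_or_ge i 2 with h2 | h2
  · have e1 : i + 1 - 2 = 0 := by omega
    have e2 : i - 2 = 0 := by omega
    simp [e1, e2, Nat.not_le.mpr h2]
  · have e1 : i + 1 - 2 = (i - 2) + 1 := by omega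
    rw [e1, sum_take_succ l (i - 2)]
    have : i - 2 < l.length := by omega
    simp [this, h2]
    ring

lemma slice_low (l : List Int) (i : Nat) (h : i < 2) :
    (PySem.List.slice l none (some ((i : Int) + 3))).sum = W l i := by
  have hc : (i : Int) + 3 = ((i + 3 : Nat) : Int) := by push_cast; ring
  rw [hc, PySem.List.slice_to_natCast]
  have e : i - 2 = 0 := by omega
  simp [W, e]

lemma slice_mid (l : List Int) (i : Nat) (h : 2 ≤ i) :
    (PySem.List.slice l (some ((i : Int) - 2)) (some ((i : Int) + 3))).sum = W l i := by
  have hc : (i : Int) - 2 = ((i - 2 : Nat) : Int) := by omega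
  have hc2 : (i : Int) + 3 = ((i + 3 : Nat) : Int) := by push_cast; ring
  rw [hc, hc2, PySem.List.slice_natCast, sum_drop_take]
  have e : (i - 2) + ((i + 3) - (i - 2)) = i + 3 := by omega
  rw [e]; rfl

lemma slice_high (l : List Int) (i : Nat) (h2 : 2 ≤ i) (h : l.length ≤ i + 3) :
    (PySem.List.slice l (some ((i : Int) - 2)) none).sum = W l i := by
  have hc : (i : Int) - 2 = ((i - 2 : Nat) : Int) := by omega
  rw [hc, PySem.List.slice_from_natCast]
  have hs := List.sum_take_add_sum_drop l (i - 2)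
  have ht : l.take (i + 3) = l := List.take_of_length_le h
  unfold W
  rw [ht]
  omega

lemma step_seat (l : List Int) (count : Int) (i : Nat) (h : i < l.length)
    (h0 : l.getD i 0 = 0) (hw : W l i = 0) :
    msBstep l.length (l, count, W l i) i = (l.set i 1, count + 1, W (l.set i 1) (i + 1)) := by
  have hWs : W (l.set i 1) i = W l i + 1 := by rw [W_set l i h, h0]; ring
  have p3 : ∀ (m : List Int), PySem.List.pyGetD m ((i : Int) + 3) 0 = m.getD (i + 3) 0 := by
    intro m
    rw [show (i : Int) + 3 = ((i + 3 : Nat) : Int) by push_cast; ring, PySem.List.pyGetD_natCast]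
  have p2 : 2 ≤ i → ∀ (m : List Int), PySem.List.pyGetD m ((i : Int) - 2) 0 = m.getD (i - 2) 0 := by
    intro h2 m
    rw [show (i : Int) - 2 = ((i - 2 : Nat) : Int) by omega, PySem.List.pyGetD_natCast]
  simp only [msBstep, PySem.List.pyGetD_natCast]
  split_ifs
  all_goals try exact absurd ⟨h0, hw⟩ ‹¬(l.getD i 0 = 0 ∧ W l i = 0)›
  all_goals try dsimp only
  all_goals simp only [PySem.List.pySetD_natCast, p3]
  all_goals try simp only [p2 ‹2 ≤ i›]
  all_goals rw [W_slide (l.set i 1) i (by simpa using h), List.length_set, hWs]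
  all_goals try simp only [Prod.mk.injEq, true_and]
  all_goals split_ifs
  all_goals ring

lemma step_skip (l : List Int) (count : Int) (i : Nat) (h : i < l.length)
    (hc : ¬ (l.getD i 0 = 0 ∧ W l i = 0)) :
    msBstep l.length (l, count, W l i) i = (l, count, W l (i + 1)) := by
  have p3 : ∀ (m : List Int), PySem.List.pyGetD m ((i : Int) + 3) 0 = m.getD (i + 3) 0 := by
    intro m
    rw [show (i : Int) + 3 = ((i + 3 : Nat) : Int) by push_cast; ring, PySem.List.pyGetD_natCast]
  have p2 : 2 ≤ i → ∀ (m : List Int), PySem.List.pyGetD m ((i : Int) - 2) 0 = m.getD (i - 2) 0 := by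
    intro h2 m
    rw [show (i : Int) - 2 = ((i - 2 : Nat) : Int) by omega, PySem.List.pyGetD_natCast]
  simp only [msBstep, PySem.List.pyGetD_natCast]
  split_ifs
  all_goals try dsimp only
  all_goals try simp only [p3]
  all_goals try simp only [p2 ‹2 ≤ i›]
  all_goals rw [W_slide l i h]
  all_goals try simp only [Prod.mk.injEq, true_and]
  all_goals split_ifs
  all_goals ring

lemma msA_eq_foldl (k : Nat) : ∀ (i : Nat) (l : List Int) (count : Int), i + k = l.length →
    msAloop l i count = ((List.range' i k).foldl (msBstep l.length) (l, count, W l i)).2.1 := by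
  induction k with
  | zero =>
    intro i l count hk
    rw [msAloop]
    simp [show ¬ i < l.length by omega]
  | succ k ih =>
    intro i l count hk
    have h : i < l.length := by omega
    have hset : ∀ v : Int, (l.set i v).length = l.length := by simp
    rw [msAloop, dif_pos h, List.range'_succ, List.foldl_cons]
    by_cases h0 : PySem.List.pyGetD l (i : Int) 0 = 0
    · have h0' : l.getD i 0 = 0 := by simpa using h0
      rw [if_pos h0]
      by_cases h2 : (i : Int) < 2
      · have h2n : i < 2 := by omega
        rw [if_pos h2]
        by_cases hs : (PySem.List.slice l none (some ((i : Int) + 3))).sum = 0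
        · have hw : W l i = 0 := by rw [← slice_low l i h2n]; exact hs
          rw [if_pos hs, PySem.List.pySetD_natCast,
            ih (i + 1) (l.set i 1) (count + 1) (by simp; omega),
            step_seat l count i h h0' hw, hset]
        · have hw : ¬ W l i = 0 := by rw [← slice_low l i h2n]; exact hs
          rw [if_neg hs, ih (i + 1) l count (by omega),
            step_skip l count i h (by intro hc; exact hw hc.2)]
      · rw [if_neg h2]
        by_cases hgt : (i : Int) > (l.length : Int) - 2
        · have h2n : 2 ≤ i := by omega
          have hlast : i + 1 = l.length := by omega
          have hk0 : k = 0 := by omega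
          rw [if_pos hgt]
          subst hk0
          by_cases hs : (PySem.List.slice l (some ((i : Int) - 2)) none).sum = 0
          · have hw : W l i = 0 := by
              rw [← slice_high l i h2n (by omega)]; exact hs
            rw [if_pos hs, step_seat l count i h h0' hw]
            rw [msAloop, PySem.List.pySetD_natCast, dif_pos (by simpa using h)]
            have hg1 : PySem.List.pyGetD (l.set i 1) (i : Int) 0 = 1 := by
              rw [PySem.List.pyGetD_natCast]
              simp [List.getD_eq_getElem?_getD, h]
            rw [if_neg (by rw [hg1]; norm_num)]
            rw [msAloop, dif_neg (by rw [hset]; omega)]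
            simp
          · have hw : ¬ W l i = 0 := by
              rw [← slice_high l i h2n (by omega)]; exact hs
            rw [if_neg hs, step_skip l count i h (by intro hc; exact hw hc.2)]
            simp
        · have h2n : 2 ≤ i := by omega
          rw [if_neg hgt]
          by_cases hs : (PySem.List.slice l (some ((i : Int) - 2)) (some ((i : Int) + 3))).sum = 0
          · have hw : W l i = 0 := by rw [← slice_mid l i h2n]; exact hs
            rw [if_pos hs, PySem.List.pySetD_natCast,
              ih (i + 1) (l.set i 1) (count + 1) (by simp; omega),
              step_seat l count i h h0' hw, hset]
          · have hw : ¬ W l i = 0 := by rw [← slice_mid l i h2n]; exact hs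
            rw [if_neg hs, ih (i + 1) l count (by omega),
              step_skip l count i h (by intro hc; exact hw hc.2)]
    · have h0' : ¬ l.getD i 0 = 0 := by simpa using h0
      rw [if_neg h0, ih (i + 1) l count (by omega),
        step_skip l count i h (by intro hc; exact h0' hc.1)]

theorem equal_thm : ∀ (lst : List Int), maximum_seating lst = maximum_seating_alt lst := by
  intro lst
  have hW0 : (PySem.List.slice lst none (some ((min lst.length 3 : Nat) : Int))).sum
      = W lst 0 := by
    rw [PySem.List.slice_to_natCast]
    unfold W
    rcases Nat.le_total lst.length 3 with h | h
    · rw [Nat.min_eq_left h, List.take_of_length_le h, List.take_of_length_le (by rfl)]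
      simp
    · rw [Nat.min_eq_right h]
      simp
  simp only [maximum_seating, maximum_seating_alt, hW0, List.range_eq_range']
  exact msA_eq_foldl lst.length 0 lst 0 (by omega)

-- ===== VERDICT (by name: the statement is the Claim_ definition above) =====
theorem maximum_seating_spec : Claim_equal_maximum_seating := by
  intro lst _
  unfold Spec_maximum_seating
  exact equal_thm lst
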